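-- pv_equiv track=rewrite | github.com/leiMizzou/OpenFDA2PG | pg_quality_analyzer/optimization_analyzer.py | _get_priority_recommendations
-- ===== SOURCE A (Python) =====
-- def _get_priority_recommendations(storage, query, maintenance, schema):
--     """
--     获取优先级排序的建议
--
--     Args:
--         storage (list): 存储优化建议
--         query (list): 查询优化建议
--         maintenance (list): 维护建议
--         schema (list): 架构改进建议
--
--     Returns:
--         list: 优先级排序的建议
--     """
--     # 建议加上类型标签
--     tagged_suggestions = []
--
--     for suggestion in storage:
--         tagged_suggestions.append({
--             'type': 'storage',
--             'suggestion': suggestion,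
--             'priority': 'high'
--         })
--
--     for suggestion in query:
--         tagged_suggestions.append({
--             'type': 'query',
--             'suggestion': suggestion,
--             'priority': 'high'
--         })
--
--     for suggestion in maintenance:
--         tagged_suggestions.append({
--             'type': 'maintenance',
--             'suggestion': suggestion,
--             'priority': 'medium'
--         })
--
--     for suggestion in schema:
--         tagged_suggestions.append({
--             'type': 'schema',
--             'suggestion': suggestion,
--             'priority': 'medium'
--         })
--
--     # 按优先级和类型排序
--     priority_order = {'high': 0, 'medium': 1, 'low': 2}
--     type_order = {'query': 0, 'storage': 1, 'schema': 2, 'maintenance': 3}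
--
--     return sorted(
--         tagged_suggestions,
--         key=lambda x: (priority_order[x['priority']], type_order[x['type']])
--     )
-- ===== SOURCE B (Python) =====
-- def _get_priority_recommendations(storage, query, maintenance, schema):
--     """Same result as A, but without any sort: the stable-sorted order is fully
--     determined by the fixed (priority, type) key of each source list, so the four
--     tagged groups are emitted directly in that order."""
--     def tagged(type_, priority, suggestions):
--         return [{'type': type_, 'suggestion': s, 'priority': priority}
--                 for s in suggestions]
--     return (tagged('query', 'high', query)
--             + tagged('storage', 'high', storage)
--             + tagged('schema', 'medium', schema)
--             + tagged('maintenance', 'medium', maintenance))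
-- ===== Notes on version B (the rewrite author's own statement) =====
-- stated objective: simpler
-- what changed: B drops the sort entirely: each source list has a fixed (priority, type) key, so the stable-sorted result is exactly the four tagged groups concatenated in the order query, storage, schema, maintenance, each in its original order.
import Mathlib
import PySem

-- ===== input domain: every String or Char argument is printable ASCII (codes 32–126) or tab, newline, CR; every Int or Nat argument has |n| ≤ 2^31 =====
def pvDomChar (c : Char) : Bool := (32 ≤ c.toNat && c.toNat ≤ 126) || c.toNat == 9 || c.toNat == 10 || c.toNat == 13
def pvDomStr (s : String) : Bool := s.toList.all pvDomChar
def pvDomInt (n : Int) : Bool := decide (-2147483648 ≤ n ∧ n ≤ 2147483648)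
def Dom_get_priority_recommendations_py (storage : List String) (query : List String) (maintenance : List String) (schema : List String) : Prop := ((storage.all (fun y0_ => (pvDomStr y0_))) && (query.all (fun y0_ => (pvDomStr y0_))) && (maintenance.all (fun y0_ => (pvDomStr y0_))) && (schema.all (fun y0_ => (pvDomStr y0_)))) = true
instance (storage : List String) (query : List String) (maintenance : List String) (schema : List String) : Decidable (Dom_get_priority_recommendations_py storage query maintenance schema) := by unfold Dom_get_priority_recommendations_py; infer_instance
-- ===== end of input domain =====

-- B replaces A's tag-everything-then-stable-sort with direct emission of the four tagged
-- groups in the order the fixed (priority, type) keys dictate; no sort call (objective: simpler).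

-- ===== PORT A =====
-- the dict literal {'type': t, 'suggestion': s, 'priority': p} built in each loop body
def pvTagA (t : String) (s : String) (p : String) : List (String × String) :=
  [("type", t), ("suggestion", s), ("priority", p)]

-- x['priority'] / x['type'] and priority_order[...] / type_order[...] are dict subscripts;
-- every key is present by construction, so Dict.getD (default never used) is exact here.
def get_priority_recommendations_py (storage : List String) (query : List String) (maintenance : List String) (schema : List String) : List (List (String × String)) :=
  let tagged1 := storage.foldl (fun acc s => acc ++ [pvTagA "storage" s "high"]) []
  let tagged2 := query.foldl (fun acc s => acc ++ [pvTagA "query" s "high"]) tagged1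
  let tagged3 := maintenance.foldl (fun acc s => acc ++ [pvTagA "maintenance" s "medium"]) tagged2
  let tagged4 := schema.foldl (fun acc s => acc ++ [pvTagA "schema" s "medium"]) tagged3
  let priority_order : PySem.Dict String Int := PySem.Dict.ofList [("high", 0), ("medium", 1), ("low", 2)]
  let type_order : PySem.Dict String Int := PySem.Dict.ofList [("query", 0), ("storage", 1), ("schema", 2), ("maintenance", 3)]
  PySem.List.sorted2 tagged4
    (fun x => priority_order.getD ((PySem.Dict.mk x).getD "priority" "") 0)
    (fun x => type_order.getD ((PySem.Dict.mk x).getD "type" "") 0)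

-- ===== PORT B =====
def pvTagB (t : String) (p : String) (s : String) : List (String × String) :=
  [("type", t), ("suggestion", s), ("priority", p)]

def get_priority_recommendations_py_alt (storage : List String) (query : List String) (maintenance : List String) (schema : List String) : List (List (String × String)) :=
  query.map (fun s => pvTagB "query" "high" s)
    ++ storage.map (fun s => pvTagB "storage" "high" s)
    ++ schema.map (fun s => pvTagB "schema" "medium" s)
    ++ maintenance.map (fun s => pvTagB "maintenance" "medium" s)

-- ===== PRECONDITION & SPEC =====
def Spec_get_priority_recommendations_py (storage : List String) (query : List String) (maintenance : List String) (schema : List String) (out : List (List (String × String))) : Prop := out = get_priority_recommendations_py_alt storage query maintenance schema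
instance (storage : List String) (query : List String) (maintenance : List String) (schema : List String) (out : List (List (String × String))) : Decidable (Spec_get_priority_recommendations_py storage query maintenance schema out) := by unfold Spec_get_priority_recommendations_py; infer_instance

-- ===== CLAIM (what is proved, stated in full; the proofs are below) =====
def Claim_equal_get_priority_recommendations_py : Prop := ∀ (storage : List String) (query : List String) (maintenance : List String) (schema : List String), Dom_get_priority_recommendations_py storage query maintenance schema → Spec_get_priority_recommendations_py storage query maintenance schema (get_priority_recommendations_py storage query maintenance schema)

-- ===== LEMMAS AND PROOFS =====

-- the comparison A's stable insertion sort uses, on the tagged dicts (proof-side helper)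
def pvBefore (a b : List (String × String)) : Bool :=
  decide ((PySem.Dict.ofList [("high", (0:Int)), ("medium", 1), ("low", 2)]).getD ((PySem.Dict.mk a).getD "priority" "") 0
        < (PySem.Dict.ofList [("high", (0:Int)), ("medium", 1), ("low", 2)]).getD ((PySem.Dict.mk b).getD "priority" "") 0)
  || (!decide ((PySem.Dict.ofList [("high", (0:Int)), ("medium", 1), ("low", 2)]).getD ((PySem.Dict.mk b).getD "priority" "") 0
        < (PySem.Dict.ofList [("high", (0:Int)), ("medium", 1), ("low", 2)]).getD ((PySem.Dict.mk a).getD "priority" "") 0)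
      && decide ((PySem.Dict.ofList [("query", (0:Int)), ("storage", 1), ("schema", 2), ("maintenance", 3)]).getD ((PySem.Dict.mk a).getD "type" "") 0
        < (PySem.Dict.ofList [("query", (0:Int)), ("storage", 1), ("schema", 2), ("maintenance", 3)]).getD ((PySem.Dict.mk b).getD "type" "") 0))

theorem pv_sorted2_eq (xs : List (List (String × String))) :
    PySem.List.sorted2 xs
      (fun x => (PySem.Dict.ofList [("high", (0:Int)), ("medium", 1), ("low", 2)]).getD ((PySem.Dict.mk x).getD "priority" "") 0)
      (fun x => (PySem.Dict.ofList [("query", (0:Int)), ("storage", 1), ("schema", 2), ("maintenance", 3)]).getD ((PySem.Dict.mk x).getD "type" "") 0)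
      = xs.foldl (fun acc x => PySem.List.insertBy pvBefore x acc) [] := rfl

-- inserting x into L ++ R, where x goes after everything in L and before everything in R
theorem pv_insertBy_blocks {α : Type} (before : α → α → Bool) (x : α) (L R : List α)
    (hL : ∀ y ∈ L, before x y = false) (hR : ∀ y ∈ R, before x y = true) :
    PySem.List.insertBy before x (L ++ R) = L ++ x :: R := by
  induction L with
  | nil =>
    cases R with
    | nil => rfl
    | cons r R' => simp [PySem.List.insertBy, hR r (by simp)]
  | cons l L' ih =>
    simp only [List.cons_append, PySem.List.insertBy, hL l (by simp)]
    simp only [Bool.false_eq_true, if_false, List.cons.injEq, true_and]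
    exact ih (fun y hy => hL y (by simp [hy]))

-- folding a same-key block into L ++ R lands the whole block, in order, between L and R
theorem pv_foldl_insertBy_blocks {α : Type} (before : α → α → Bool) (xs L R : List α)
    (h1 : ∀ x ∈ xs, ∀ y ∈ L, before x y = false)
    (h2 : ∀ x ∈ xs, ∀ y ∈ R, before x y = true)
    (h3 : ∀ x ∈ xs, ∀ x' ∈ xs, before x x' = false) :
    xs.foldl (fun acc x => PySem.List.insertBy before x acc) (L ++ R) = L ++ xs ++ R := by
  induction xs generalizing L with
  | nil => simp
  | cons a as' ih =>
    simp only [List.foldl_cons]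
    rw [pv_insertBy_blocks before a L R (h1 a (by simp)) (h2 a (by simp))]
    have e : L ++ a :: R = (L ++ [a]) ++ R := by simp
    have g1 : ∀ x ∈ as', ∀ y ∈ L ++ [a], before x y = false := by
      intro z hz y hy
      rcases List.mem_append.mp hy with h | h
      · exact h1 z (List.mem_cons_of_mem _ hz) y h
      · simp only [List.mem_singleton] at h
        rw [h]; exact h3 z (List.mem_cons_of_mem _ hz) a (by simp)
    have g2 : ∀ x ∈ as', ∀ y ∈ R, before x y = true :=
      fun z hz y hy => h2 z (List.mem_cons_of_mem _ hz) y hy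
    have g3 : ∀ x ∈ as', ∀ x' ∈ as', before x x' = false :=
      fun z hz y hy => h3 z (List.mem_cons_of_mem _ hz) y (List.mem_cons_of_mem _ hy)
    rw [e, ih (L ++ [a]) g1 g2 g3]
    simp

theorem get_priority_recommendations_py_eq_alt (storage query maintenance schema : List String) :
    get_priority_recommendations_py storage query maintenance schema
      = get_priority_recommendations_py_alt storage query maintenance schema := by
  unfold get_priority_recommendations_py get_priority_recommendations_py_alt
  simp only [PySem.List.foldl_append_singleton_eq_map, List.nil_append, List.append_assoc]
  rw [pv_sorted2_eq]
  have bSS : ∀ a b, pvBefore (pvTagA "storage" a "high") (pvTagA "storage" b "high") = false := fun _ _ => rfl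
  have bQS : ∀ a b, pvBefore (pvTagA "query" a "high") (pvTagA "storage" b "high") = true := fun _ _ => rfl
  have bQQ : ∀ a b, pvBefore (pvTagA "query" a "high") (pvTagA "query" b "high") = false := fun _ _ => rfl
  have bMQ : ∀ a b, pvBefore (pvTagA "maintenance" a "medium") (pvTagA "query" b "high") = false := fun _ _ => rfl
  have bMS : ∀ a b, pvBefore (pvTagA "maintenance" a "medium") (pvTagA "storage" b "high") = false := fun _ _ => rfl
  have bMM : ∀ a b, pvBefore (pvTagA "maintenance" a "medium") (pvTagA "maintenance" b "medium") = false := fun _ _ => rfl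
  have bCQ : ∀ a b, pvBefore (pvTagA "schema" a "medium") (pvTagA "query" b "high") = false := fun _ _ => rfl
  have bCS : ∀ a b, pvBefore (pvTagA "schema" a "medium") (pvTagA "storage" b "high") = false := fun _ _ => rfl
  have bCM : ∀ a b, pvBefore (pvTagA "schema" a "medium") (pvTagA "maintenance" b "medium") = true := fun _ _ => rfl
  have bCC : ∀ a b, pvBefore (pvTagA "schema" a "medium") (pvTagA "schema" b "medium") = false := fun _ _ => rfl
  have memmap : ∀ (t p : String) (xs : List String) (y : List (String × String)),
      y ∈ xs.map (fun s => pvTagA t s p) → ∃ s, y = pvTagA t s p := by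
    intro t p xs y hy
    rcases List.mem_map.mp hy with ⟨s, _, rfl⟩
    exact ⟨s, rfl⟩
  set S := storage.map (fun s => pvTagA "storage" s "high") with hS
  set Q := query.map (fun s => pvTagA "query" s "high") with hQ
  set M := maintenance.map (fun s => pvTagA "maintenance" s "medium") with hM
  set C := schema.map (fun s => pvTagA "schema" s "medium") with hC
  rw [show S ++ (Q ++ (M ++ C)) = ((S ++ Q) ++ M) ++ C by simp]
  rw [List.foldl_append, List.foldl_append, List.foldl_append]
  rw [show ([] : List (List (String × String))) = [] ++ [] from rfl,
      pv_foldl_insertBy_blocks pvBefore S [] [] (by simp) (by simp)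
        (fun x hx y hy => by
          obtain ⟨a, rfl⟩ := memmap _ _ _ _ hx; obtain ⟨b, rfl⟩ := memmap _ _ _ _ hy; exact bSS a b)]
  simp only [List.nil_append, List.append_nil]
  rw [show S = [] ++ S from rfl,
      pv_foldl_insertBy_blocks pvBefore Q [] S (by simp)
        (fun x hx y hy => by
          obtain ⟨a, rfl⟩ := memmap _ _ _ _ hx; obtain ⟨b, rfl⟩ := memmap _ _ _ _ hy; exact bQS a b)
        (fun x hx y hy => by
          obtain ⟨a, rfl⟩ := memmap _ _ _ _ hx; obtain ⟨b, rfl⟩ := memmap _ _ _ _ hy; exact bQQ a b)]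
  simp only [List.nil_append]
  rw [show Q ++ S = (Q ++ S) ++ [] by simp,
      pv_foldl_insertBy_blocks pvBefore M (Q ++ S) []
        (fun x hx y hy => by
          obtain ⟨a, rfl⟩ := memmap _ _ _ _ hx
          rcases List.mem_append.mp hy with h | h
          · obtain ⟨b, rfl⟩ := memmap _ _ _ _ h; exact bMQ a b
          · obtain ⟨b, rfl⟩ := memmap _ _ _ _ h; exact bMS a b)
        (by simp)
        (fun x hx y hy => by
          obtain ⟨a, rfl⟩ := memmap _ _ _ _ hx; obtain ⟨b, rfl⟩ := memmap _ _ _ _ hy; exact bMM a b)]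
  simp only [List.append_nil, List.append_assoc]
  rw [show Q ++ (S ++ M) = (Q ++ S) ++ M by simp,
      pv_foldl_insertBy_blocks pvBefore C (Q ++ S) M
        (fun x hx y hy => by
          obtain ⟨a, rfl⟩ := memmap _ _ _ _ hx
          rcases List.mem_append.mp hy with h | h
          · obtain ⟨b, rfl⟩ := memmap _ _ _ _ h; exact bCQ a b
          · obtain ⟨b, rfl⟩ := memmap _ _ _ _ h; exact bCS a b)
        (fun x hx y hy => by
          obtain ⟨a, rfl⟩ := memmap _ _ _ _ hx; obtain ⟨b, rfl⟩ := memmap _ _ _ _ hy; exact bCM a b)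
        (fun x hx y hy => by
          obtain ⟨a, rfl⟩ := memmap _ _ _ _ hx; obtain ⟨b, rfl⟩ := memmap _ _ _ _ hy; exact bCC a b)]
  simp [hS, hQ, hM, hC, pvTagA, pvTagB]

-- ===== VERDICT (by name: the statement is the Claim_ definition above) =====
theorem get_priority_recommendations_py_spec : Claim_equal_get_priority_recommendations_py := by
  intro storage query maintenance schema _
  exact get_priority_recommendations_py_eq_alt storage query maintenance schema
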